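-- pv_equiv track=rewrite | github.com/ldg3045/sparta_ai_9 | 코드카타/코드카타.py | solution
-- ===== SOURCE A (Python) =====
-- from collections import Counter
--
-- def solution(array):
--     # 배열의 요소들의 빈도를 계산
--     count = Counter(array)
--
--     # 빈도 수가 가장 높은 요소를 찾음
--     most_common = count.most_common()
--
--     # 가장 높은 빈도 수를 가진 요소를 찾음
--     max_frequency = most_common[0][1]
--
--     # 가장 높은 빈도 수를 가진 요소가 여러 개 있는지 확인
--     if len([item for item in most_common if item[1] == max_frequency]) > 1:
--         return -1
--     else:
--         return most_common[0][0]
-- ===== SOURCE B (Python) =====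
-- def solution(array):
--     count = {}
--     for x in array:
--         count[x] = count.get(x, 0) + 1
--     best, best_c, tie = -1, 0, False
--     for k, c in count.items():
--         if c > best_c:
--             best, best_c, tie = k, c, False
--         elif c == best_c:
--             tie = True
--     return -1 if tie else best
-- ===== Notes on version B (the rewrite author's own statement) =====
-- stated objective: simpler
-- what changed: Replaced Counter + most_common (a stable O(k log k) sort of the items by frequency) and a filter pass with a single running-max scan over a plain count dict that tracks the best element and a tie flag.
import Mathlib
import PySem

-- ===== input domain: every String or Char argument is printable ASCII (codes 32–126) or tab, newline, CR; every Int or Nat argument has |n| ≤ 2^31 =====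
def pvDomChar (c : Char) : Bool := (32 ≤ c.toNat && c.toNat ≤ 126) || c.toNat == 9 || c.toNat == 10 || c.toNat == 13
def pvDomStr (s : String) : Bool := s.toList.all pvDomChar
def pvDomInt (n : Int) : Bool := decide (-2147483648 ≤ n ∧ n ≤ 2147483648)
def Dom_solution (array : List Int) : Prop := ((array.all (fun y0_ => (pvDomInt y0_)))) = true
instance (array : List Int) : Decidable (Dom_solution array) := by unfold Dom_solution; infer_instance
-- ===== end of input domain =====

-- B replaces A's sort of the frequency table (most_common) by a single running-max scan with a
-- tie flag; return-value equivalence (objective: simpler).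

-- ===== PORT A =====
def solution (array : List Int) : Int :=
  let count := PySem.Dict.counter array
  let most_common := PySem.List.sorted count.items (fun p => p.2) true
  match most_common with
  | [] => 0  -- most_common[0] raises IndexError in Python; excluded by Pre_solution
  | h :: _ =>
    let max_frequency := h.2
    if ((most_common.filter (fun item => item.2 == max_frequency)).length > 1) then -1
    else h.1

-- ===== PORT B =====
def solutionAltStep (s : Int × Int × Bool) (p : Int × Int) : Int × Int × Bool :=
  if p.2 > s.2.1 then (p.1, p.2, false)
  else if p.2 == s.2.1 then (s.1, s.2.1, true)
  else s

def solution_alt (array : List Int) : Int :=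
  let count := array.foldl (fun d x => d.insert x (d.getD x 0 + 1)) PySem.Dict.empty
  let r := count.items.foldl solutionAltStep (-1, 0, false)
  if r.2.2 then -1 else r.1

-- ===== PRECONDITION & SPEC =====
-- Pre_ excludes exactly the empty list, on which A raises IndexError.
def Pre_solution (array : List Int) : Prop := array ≠ []
instance (array : List Int) : Decidable (Pre_solution array) := by unfold Pre_solution; infer_instance
def pvWitness_solution : List Int := [1, 2, 2]

def Spec_solution (array : List Int) (out : Int) : Prop := out = solution_alt array
instance (array : List Int) (out : Int) : Decidable (Spec_solution array out) := by unfold Spec_solution; infer_instance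

-- ===== CLAIM (what is proved, stated in full; the proofs are below) =====
def Claim_equal_solution : Prop := ∀ (array : List Int), Dom_solution array → Pre_solution array → Spec_solution array (solution array)

-- ===== LEMMAS AND PROOFS =====

-- running max of the second components, seeded with c
def maxC (L : List (Int × Int)) (c : Int) : Int := L.foldl (fun a p => max a p.2) c

theorem maxC_le_iff (L : List (Int × Int)) (c b : Int) :
    maxC L c ≤ b ↔ c ≤ b ∧ ∀ p ∈ L, p.2 ≤ b := by
  induction L generalizing c with
  | nil => simp [maxC]
  | cons q L ih =>
      simp only [maxC, List.foldl_cons] at *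
      rw [ih]
      constructor
      · rintro ⟨h1, h2⟩
        exact ⟨le_trans (le_max_left _ _) h1, by
          intro p hp
          rcases List.mem_cons.1 hp with h | h
          · subst h; exact le_trans (le_max_right _ _) h1
          · exact h2 p h⟩
      · rintro ⟨h1, h2⟩
        exact ⟨max_le h1 (h2 q (by simp)), fun p hp => h2 p (by simp [hp])⟩

theorem le_maxC_self (L : List (Int × Int)) (c : Int) : c ≤ maxC L c :=
  ((maxC_le_iff L c (maxC L c)).1 le_rfl).1

theorem le_maxC_of_mem {L : List (Int × Int)} {p : Int × Int} (hp : p ∈ L) (c : Int) :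
    p.2 ≤ maxC L c :=
  ((maxC_le_iff L c (maxC L c)).1 le_rfl).2 p hp

theorem maxC_attained (L : List (Int × Int)) (c : Int) :
    maxC L c = c ∨ ∃ p ∈ L, p.2 = maxC L c := by
  induction L generalizing c with
  | nil => simp [maxC]
  | cons q L ih =>
      simp only [maxC, List.foldl_cons] at *
      rcases ih (max c q.2) with h | ⟨p, hp, hpe⟩
      · rcases max_choice c q.2 with hm | hm
        · left; rw [h, hm]
        · right; exact ⟨q, by simp, by rw [h, hm]⟩
      · right; exact ⟨p, by simp [hp], hpe⟩

-- phase 2: nothing in L exceeds the current max c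
theorem fold_no_exceed (L : List (Int × Int)) (b c : Int) (t : Bool)
    (h : ∀ p ∈ L, p.2 ≤ c) :
    L.foldl solutionAltStep (b, c, t) = (b, c, t || L.any (fun p => p.2 == c)) := by
  induction L generalizing t with
  | nil => simp
  | cons q L ih =>
      have hq : q.2 ≤ c := h q (by simp)
      simp only [List.foldl_cons, solutionAltStep]
      rw [if_neg (by simpa using not_lt.2 hq)]
      by_cases hqe : q.2 = c
      · rw [if_pos (by simpa using hqe)]
        rw [ih true (fun p hp => h p (List.mem_cons_of_mem _ hp))]
        simp [hqe]
      · rw [if_neg (by simpa using hqe)]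
        rw [ih t (fun p hp => h p (List.mem_cons_of_mem _ hp))]
        have hb : (q.2 == c) = false := by simpa using hqe
        simp [hb]

-- general characterisation when some element exceeds c
theorem fold_spec (L : List (Int × Int)) (b c : Int) (t : Bool)
    (h : ¬ ∀ p ∈ L, p.2 ≤ c) :
    L.foldl solutionAltStep (b, c, t) =
      (((L.find? (fun p => p.2 == maxC L c)).map (·.1)).getD b, maxC L c,
        decide (2 ≤ L.countP (fun p => p.2 == maxC L c))) := by
  induction L generalizing b c t with
  | nil => exact absurd (by simp) h
  | cons q L ih =>
      simp only [List.foldl_cons]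
      have hmaxcons : maxC (q :: L) c = maxC L (max c q.2) := rfl
      by_cases hq : q.2 > c
      · -- q takes over
        rw [solutionAltStep, if_pos (by simpa using hq)]
        have hmax : maxC (q :: L) c = maxC L q.2 := by
          rw [hmaxcons, max_eq_right (le_of_lt hq)]
        by_cases hrest : ∀ p ∈ L, p.2 ≤ q.2
        · -- q is the (first) maximum
          rw [fold_no_exceed L q.1 q.2 false hrest]
          have hM : maxC (q :: L) c = q.2 := by
            rw [hmax]
            exact le_antisymm ((maxC_le_iff L q.2 q.2).2 ⟨le_rfl, hrest⟩) (le_maxC_self L q.2)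
          rw [hM]
          rw [List.find?_cons_of_pos (by simp)]
          simp only [Option.map_some, Option.getD_some, List.countP_cons, beq_self_eq_true,
            if_pos, Prod.mk.injEq, true_and]
          rcases h2 : L.any (fun p => p.2 == q.2) with _ | _
          · have h0 : L.countP (fun p => p.2 == q.2) = 0 := by
              rw [List.countP_eq_zero]
              intro p hp
              have := (List.any_eq_false.1 h2) p hp
              simpa using this
            simp [h0]
          · obtain ⟨p, hp, hpe⟩ := List.any_eq_true.1 h2
            have h1 : 1 ≤ L.countP (fun p => p.2 == q.2) :=
              List.countP_pos_iff.2 ⟨p, hp, hpe⟩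
            have : decide (2 ≤ L.countP (fun p => p.2 == q.2) + 1) = true := by
              rw [decide_eq_true_eq]; omega
            simp [this]
        · -- maximum is further right and exceeds q.2
          rw [ih q.1 q.2 false hrest, hmax]
          have hqlt : q.2 < maxC L q.2 := by
            push_neg at hrest
            obtain ⟨p, hp, hpl⟩ := hrest
            exact lt_of_lt_of_le hpl (le_maxC_of_mem hp q.2)
          have hqne : (q.2 == maxC L q.2) = false := by
            simp [ne_of_lt hqlt]
          have hatt : ∃ p ∈ L, p.2 = maxC L q.2 := by
            rcases maxC_attained L q.2 with h0 | h0
            · exact absurd h0 (ne_of_gt hqlt)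
            · exact h0
          obtain ⟨p, hp, hpe⟩ := hatt
          have hsome : (L.find? (fun p => p.2 == maxC L q.2)).isSome :=
            List.find?_isSome.2 ⟨p, hp, by simp [hpe]⟩
          obtain ⟨r, hr⟩ := Option.isSome_iff_exists.1 hsome
          rw [List.find?_cons_of_neg (by simp [hqne])]
          simp [hr, List.countP_cons, hqne]
      · -- q does not beat c: accumulator's best/max unchanged
        have hle : q.2 ≤ c := not_lt.1 (by simpa using hq)
        have hmax : maxC (q :: L) c = maxC L c := by
          rw [hmaxcons, max_eq_left hle]
        have hrest : ¬ ∀ p ∈ L, p.2 ≤ c := by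
          intro hall
          exact h (fun p hp => by
            rcases List.mem_cons.1 hp with h0 | h0
            · subst h0; exact hle
            · exact hall p h0)
        have hlt : c < maxC L c := by
          push_neg at hrest
          obtain ⟨p, hp, hpl⟩ := hrest
          exact lt_of_lt_of_le hpl (le_maxC_of_mem hp c)
        have hqneM : (q.2 == maxC L c) = false := by
          simp [ne_of_lt (lt_of_le_of_lt hle hlt)]
        have hstep : solutionAltStep (b, c, t) q =
            (b, c, t || (q.2 == c)) := by
          rw [solutionAltStep, if_neg (by simpa using hq)]
          by_cases hqe : q.2 = c
          · rw [if_pos (by simpa using hqe)]; simp [hqe]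
          · rw [if_neg (by simpa using hqe)]; simp [hqe]
        rw [hstep, ih b c _ hrest, hmax]
        simp only [List.find?_cons, List.countP_cons, hqneM]
        simp

-- the filter of a length-one filter pins down every satisfying member
theorem eq_of_countP_eq_one {L : List (Int × Int)} {P : Int × Int → Bool}
    (h1 : L.countP P = 1) {a b : Int × Int} (ha : a ∈ L) (hb : b ∈ L)
    (hpa : P a = true) (hpb : P b = true) : a = b := by
  have hlen : (L.filter P).length = 1 := by
    rw [← List.countP_eq_length_filter]; exact h1
  obtain ⟨x, hx⟩ := List.length_eq_one_iff.1 hlen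
  have hax : a ∈ L.filter P := List.mem_filter.2 ⟨ha, hpa⟩
  have hbx : b ∈ L.filter P := List.mem_filter.2 ⟨hb, hpb⟩
  rw [hx] at hax hbx
  simp at hax hbx
  rw [hax, hbx]

theorem solution_main (array : List Int) (hpre : array ≠ []) :
    solution array = solution_alt array := by
  simp only [solution, solution_alt]
  rw [PySem.Dict.foldl_insert_getD_add_one_eq_counter]
  set L := (PySem.Dict.counter array).items with hL
  have hpos : ∀ p ∈ L, 0 < p.2 := by
    intro p hp
    rw [hL, PySem.Dict.items_counter] at hp
    obtain ⟨k, hk, rfl⟩ := List.mem_map.1 hp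
    have hk' : k ∈ array := (PySem.Set.mem_ofList _ _).1 hk
    show (0 : Int) < ((array.count k : Nat) : Int)
    exact_mod_cast List.count_pos_iff.2 hk'
  have hne : L ≠ [] := by
    rw [hL, PySem.Dict.items_counter]
    obtain ⟨x, xs, rfl⟩ := List.exists_cons_of_ne_nil hpre
    have hx : x ∈ PySem.Set.ofList (x :: xs) := (PySem.Set.mem_ofList _ _).2 (by simp)
    exact List.ne_nil_of_mem (List.mem_map_of_mem hx)
  have hex : ¬ ∀ p ∈ L, p.2 ≤ 0 := by
    intro hall
    obtain ⟨p, ps, hpe⟩ := List.exists_cons_of_ne_nil hne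
    have h1 := hpos p (by rw [hpe]; simp)
    have h2 := hall p (by rw [hpe]; simp)
    omega
  rw [fold_spec L (-1) 0 false hex]
  set M := maxC L 0 with hM
  set S := PySem.List.sorted L (fun p => p.2) true with hS
  have hSne : S ≠ [] := by
    rw [hS, Ne, PySem.List.sorted_eq_nil_iff]; exact hne
  obtain ⟨hd, tS, hScons⟩ := List.exists_cons_of_ne_nil hSne
  simp only [hScons]
  have hhd : hd ∈ L := by
    have hmem : hd ∈ S := by rw [hScons]; simp
    rw [hS] at hmem
    exact (PySem.List.mem_sorted _ _ _ _).1 hmem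
  have hge : ∀ y ∈ L, y.2 ≤ hd.2 :=
    PySem.List.key_head_sorted_rev_ge L (fun p => p.2) (hS ▸ hScons)
  have hhdM : hd.2 = M :=
    le_antisymm (le_maxC_of_mem hhd 0)
      ((maxC_le_iff L 0 hd.2).2 ⟨le_of_lt (hpos hd hhd), hge⟩)
  have hperm : (hd :: tS).Perm L := hScons ▸ hS ▸ PySem.List.sorted_perm L (fun p => p.2) true
  have hcntS : ((hd :: tS).filter (fun item => item.2 == hd.2)).length
      = L.countP (fun p => p.2 == M) := by
    rw [← List.countP_eq_length_filter]
    rw [show (fun (item : Int × Int) => item.2 == hd.2) = (fun p => p.2 == M) by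
      funext p; rw [hhdM]]
    exact hperm.countP_eq _
  by_cases h2 : 2 ≤ L.countP (fun p => p.2 == M)
  · rw [if_pos (by rw [hcntS]; omega)]
    rw [if_pos (by rw [decide_eq_true_eq]; exact h2)]
  · have hcnt1 : 1 ≤ L.countP (fun p => p.2 == M) :=
      List.countP_pos_iff.2 ⟨hd, hhd, by simp [hhdM]⟩
    have hcq : L.countP (fun p => p.2 == M) = 1 := by omega
    have hsome : (L.find? (fun p => p.2 == M)).isSome :=
      List.find?_isSome.2 ⟨hd, hhd, by simp [hhdM]⟩
    obtain ⟨r, hr⟩ := Option.isSome_iff_exists.1 hsome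
    have hrhd : r = hd :=
      eq_of_countP_eq_one hcq (List.mem_of_find?_eq_some hr) hhd
        (List.find?_eq_some_iff_append.1 hr |>.1) (by simp [hhdM])
    rw [if_neg (by rw [hcntS]; omega)]
    rw [if_neg (by rw [decide_eq_true_eq]; exact h2)]
    rw [hr, hrhd]
    rfl

-- ===== VERDICT (by name: the statement is the Claim_ definition above) =====
theorem solution_spec : Claim_equal_solution := by
  intro array _ hpre
  unfold Spec_solution
  exact solution_main array hpre
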